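-- pv_equiv track=rewrite | github.com/cuongpiger/algorithms-training | solutions/130.py | can_form_zero_array
-- ===== SOURCE A (Python) =====
-- from typing import List
--
-- def can_form_zero_array(
--     nums: List[int], queries: List[List[int]], k: int
-- ) -> bool:
--     n = len(nums)
--     total_sum = 0
--     difference_array = [0] * (n + 1)
--
--     # Process query
--     for query_index in range(k):
--         start, end, val = queries[query_index]
--
--         # Process start and end of range
--         difference_array[start] += val
--         difference_array[end + 1] -= val
--
--     # Check if zero array can be formed
--     for num_index in range(n):
--         total_sum += difference_array[num_index]
--         if total_sum < nums[num_index]: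
--             return False
--     return True
-- ===== SOURCE B (Python) =====
-- from typing import List
--
-- def can_form_zero_array(
--     nums: List[int], queries: List[List[int]], k: int
-- ) -> bool:
--     for num_index in range(len(nums)):
--         coverage = 0
--         for query_index in range(k):
--             start, end, val = queries[query_index]
--             if start <= num_index <= end:
--                 coverage += val
--         if coverage < nums[num_index]:
--             return False
--     return True
-- ===== Notes on version B (the rewrite author's own statement) =====
-- stated objective: alternative
-- what changed: Drops the shared difference array and prefix-sum sweep entirely: B scans the first k queries afresh for every index and sums the values of those whose inclusive range covers it, short-circuiting on the first under-covered index.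
-- outside the precondition, e.g. on can_form_zero_array([1], [[-1, 0, 1]], 1): A returns False, B returns True; on can_form_zero_array([-1, -1], [[1, -1, 9]], 1): A returns False, B returns True
import Mathlib
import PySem

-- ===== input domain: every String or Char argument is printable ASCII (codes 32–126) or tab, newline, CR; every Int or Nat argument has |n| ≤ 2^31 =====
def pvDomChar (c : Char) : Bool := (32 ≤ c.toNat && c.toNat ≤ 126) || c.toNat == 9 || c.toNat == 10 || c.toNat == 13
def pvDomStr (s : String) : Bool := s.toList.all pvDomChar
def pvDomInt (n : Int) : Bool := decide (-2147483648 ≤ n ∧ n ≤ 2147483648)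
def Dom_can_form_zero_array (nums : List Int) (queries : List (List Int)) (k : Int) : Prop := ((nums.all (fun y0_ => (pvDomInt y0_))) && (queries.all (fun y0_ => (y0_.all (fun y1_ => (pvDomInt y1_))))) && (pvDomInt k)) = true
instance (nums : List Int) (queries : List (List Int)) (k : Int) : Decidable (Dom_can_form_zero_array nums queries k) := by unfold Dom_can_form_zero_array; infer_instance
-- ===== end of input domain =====

-- B drops A's difference-array/prefix-sum table and instead rescans the first k queries for
-- every index, summing the values of the queries covering it (same value, different algorithm;
-- not faster).

-- ===== PORT A =====
def can_form_zero_array (nums : List Int) (queries : List (List Int)) (k : Int) : Bool :=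
  let n := nums.length
  let da := (PySem.List.pyRange 0 k 1).foldl
    (fun da qi =>
      let q := PySem.List.pyGetD queries qi []
      let s := PySem.List.pyGetD q 0 0
      let e := PySem.List.pyGetD q 1 0
      let v := PySem.List.pyGetD q 2 0
      let da1 := PySem.List.pySetD da s (PySem.List.pyGetD da s 0 + v)
      PySem.List.pySetD da1 (e + 1) (PySem.List.pyGetD da1 (e + 1) 0 - v))
    (List.replicate (n + 1) 0)
  ((PySem.List.pyRange 0 (n : Int) 1).foldl
    (fun st i =>
      match st with
      | none => none
      | some total =>
        let total := total + PySem.List.pyGetD da i 0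
        if total < PySem.List.pyGetD nums i 0 then none else some total)
    (some (0 : Int))).isSome

-- ===== PORT B =====
def can_form_zero_array_alt (nums : List Int) (queries : List (List Int)) (k : Int) : Bool :=
  (PySem.List.pyRange 0 (nums.length : Int) 1).all (fun i =>
    let cov := (PySem.List.pyRange 0 k 1).foldl
      (fun c qi =>
        let q := PySem.List.pyGetD queries qi []
        let s := PySem.List.pyGetD q 0 0
        let e := PySem.List.pyGetD q 1 0
        let v := PySem.List.pyGetD q 2 0
        if s ≤ i ∧ i ≤ e then c + v else c)
      0
    !(decide (cov < PySem.List.pyGetD nums i 0)))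

-- ===== PRECONDITION & SPEC =====
-- Pre_ excludes the inputs where A raises (k > len(queries), a non-triple among the first k
-- queries, or a range endpoint indexing off the (n+1)-slot array), and restricts the first k
-- queries to well-formed ranges (0 <= start <= end + 1): a query with start < 0 or
-- end < start - 1 lies outside the task's natural domain, and there A's difference-array
-- reading (Python negative indexing, inverted ranges) and B's interval reading are two
-- unspecified choices.
def preQuery (n : Int) (q : List Int) : Bool :=
  match q with
  | [s, e, _] => decide (0 ≤ s) && decide (s ≤ e + 1) && decide (e + 1 ≤ n)
  | _ => false

def Pre_can_form_zero_array (nums : List Int) (queries : List (List Int)) (k : Int) : Prop :=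
  k ≤ (queries.length : Int) ∧ (queries.take k.toNat).all (preQuery (nums.length : Int)) = true

instance (nums : List Int) (queries : List (List Int)) (k : Int) : Decidable (Pre_can_form_zero_array nums queries k) := by
  unfold Pre_can_form_zero_array; infer_instance

def pvWitness_can_form_zero_array : List Int × List (List Int) × Int := ([1, 2], [[0, 1, 2]], 1)

def Spec_can_form_zero_array (nums : List Int) (queries : List (List Int)) (k : Int) (out : Bool) : Prop := out = can_form_zero_array_alt nums queries k
instance (nums : List Int) (queries : List (List Int)) (k : Int) (out : Bool) : Decidable (Spec_can_form_zero_array nums queries k out) := by unfold Spec_can_form_zero_array; infer_instance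

-- ===== CLAIM (what is proved, stated in full; the proofs are below) =====
def Claim_equal_can_form_zero_array : Prop := ∀ (nums : List Int) (queries : List (List Int)) (k : Int), Dom_can_form_zero_array nums queries k → Pre_can_form_zero_array nums queries k → Spec_can_form_zero_array nums queries k (can_form_zero_array nums queries k)

-- ===== LEMMAS AND PROOFS =====

-- query field accessors (proof-local shorthands)
def qS (q : List Int) : Int := PySem.List.pyGetD q 0 0
def qE (q : List Int) : Int := PySem.List.pyGetD q 1 0
def qV (q : List Int) : Int := PySem.List.pyGetD q 2 0

theorem qS_triple (s e v : Int) : qS [s, e, v] = s := rfl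
theorem qE_triple (s e v : Int) : qE [s, e, v] = e := rfl
theorem qV_triple (s e v : Int) : qV [s, e, v] = v := rfl

-- one difference-array update of A
def stepA (da : List Int) (q : List Int) : List Int :=
  let da1 := PySem.List.pySetD da (qS q) (PySem.List.pyGetD da (qS q) 0 + qV q)
  PySem.List.pySetD da1 (qE q + 1) (PySem.List.pyGetD da1 (qE q + 1) 0 - qV q)

-- A's difference array, canonical form
def diffOf (queries : List (List Int)) (k : Int) (N : Nat) : List Int :=
  (PySem.List.pyRange 0 k 1).foldl
    (fun da qi => stepA da (PySem.List.pyGetD queries qi [])) (List.replicate (N + 1) 0)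

-- one step of A's checking loop, canonical form
def stepL (da nums : List Int) (st : Option Int) (i : Int) : Option Int :=
  match st with
  | none => none
  | some total =>
    let total := total + PySem.List.pyGetD da i 0
    if total < PySem.List.pyGetD nums i 0 then none else some total

-- one step of B's inner scan, canonical form
def covStep (i c : Int) (q : List Int) : Int :=
  if qS q ≤ i ∧ i ≤ qE q then c + qV q else c

-- B's coverage of index i, canonical form
def covAt (queries : List (List Int)) (k : Int) (i : Int) : Int :=
  (PySem.List.pyRange 0 k 1).foldl
    (fun c qi => covStep i c (PySem.List.pyGetD queries qi [])) 0

-- total value contributed below boundary m (i.e. covering index m-1)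
def covTake (l : List (List Int)) (m : Nat) : Int :=
  (l.map (fun q => if qS q < (m : Int) ∧ (m : Int) ≤ qE q + 1 then qV q else 0)).sum

theorem pyGetD_nonneg_getD {α : Type} (xs : List α) (i : Int) (d : α) (h0 : 0 ≤ i) :
    PySem.List.pyGetD xs i d = xs.getD i.toNat d := by
  conv_lhs => rw [← Int.toNat_of_nonneg h0]
  rw [PySem.List.pyGetD_natCast]

theorem getD_take_eq {α : Type} (xs : List α) (t i : Nat) (d : α) (hit : i < t) :
    (xs.take t).getD i d = xs.getD i d := by
  induction xs generalizing t i with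
  | nil => simp
  | cons a xs ih =>
    cases t with
    | zero => omega
    | succ t =>
      cases i with
      | zero => simp
      | succ i => simpa using ih t i (by omega)

theorem pyGetD_take {α : Type} (xs : List α) (t : Nat) (i : Int) (d : α)
    (h0 : 0 ≤ i) (ht : i < (t : Int)) :
    PySem.List.pyGetD (xs.take t) i d = PySem.List.pyGetD xs i d := by
  rw [pyGetD_nonneg_getD (xs.take t) i d h0, pyGetD_nonneg_getD xs i d h0]
  exact getD_take_eq xs t i.toNat d (by omega)

-- reduce a 'for query_index in range(k)' fold over queries[query_index] to a fold over take
theorem fold_take {β : Type} (queries : List (List Int)) (k : Int)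
    (hk : k ≤ (queries.length : Int)) (f : β → List Int → β) (init : β) :
    (PySem.List.pyRange 0 k 1).foldl
        (fun acc qi => f acc (PySem.List.pyGetD queries qi [])) init
      = (queries.take k.toNat).foldl f init := by
  by_cases h0 : 0 ≤ k
  · have hlen : (((queries.take k.toNat).length : Nat) : Int) = k := by
      simp only [List.length_take]
      omega
    have step1 : (PySem.List.pyRange 0 k 1).foldl
          (fun acc qi => f acc (PySem.List.pyGetD queries qi [])) init
        = (PySem.List.pyRange 0 k 1).foldl
          (fun acc qi => f acc (PySem.List.pyGetD (queries.take k.toNat) qi [])) init := by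
      apply PySem.List.foldl_congr_mem
      intro acc x hx
      rw [PySem.List.mem_pyRange_one] at hx
      rw [pyGetD_take queries k.toNat x [] hx.1 (by omega)]
    rw [step1,
        show PySem.List.pyRange 0 k 1
            = PySem.List.pyRange 0 (((queries.take k.toNat).length : Nat) : Int) 1 from by
          rw [hlen]]
    exact PySem.List.foldl_pyRange_zero_pyGetD' (queries.take k.toNat) [] f init
  · rw [PySem.List.pyRange_one_eq_nil (by omega), Int.toNat_of_nonpos (by omega)]
    simp

theorem take_set_sum (l : List Int) (t : Nat) (x : Int) (m : Nat) (h : t < l.length) :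
    ((l.set t x).take m).sum = (l.take m).sum + (if t < m then x - l.getD t 0 else 0) := by
  induction l generalizing t m with
  | nil => simp at h
  | cons a l ih =>
    cases m with
    | zero => simp
    | succ m =>
      cases t with
      | zero =>
        simp only [List.set_cons_zero, List.take_succ_cons, List.sum_cons, List.getD_cons_zero,
          Nat.zero_lt_succ, if_pos]
        ring
      | succ t =>
        have hh := ih t m (by simpa using h)
        rw [show (a :: l).set (t + 1) x = a :: l.set t x from rfl]
        simp only [List.take_succ_cons, List.sum_cons, List.getD_cons_succ, hh]
        by_cases hc : t < m
        · rw [if_pos hc, if_pos (by omega)]; ring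
        · rw [if_neg hc, if_neg (by omega)]; ring

theorem take_succ_sum (l : List Int) (m : Nat) (h : m < l.length) :
    (l.take (m + 1)).sum = (l.take m).sum + l.getD m 0 := by
  induction l generalizing m with
  | nil => simp at h
  | cons a l ih =>
    cases m with
    | zero => simp
    | succ m =>
      simp only [List.take_succ_cons, List.sum_cons, List.getD_cons_succ,
        ih m (by simpa using h)]
      ring

theorem sum_take_replicate_zero (n m : Nat) : ((List.replicate n (0 : Int)).take m).sum = 0 := by
  induction n generalizing m with
  | zero => simp
  | succ n ih =>
    cases m with
    | zero => simp
    | succ m => simpa [List.replicate_succ] using ih m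

theorem length_stepA (da : List Int) (q : List Int) : (stepA da q).length = da.length := by
  simp [stepA, PySem.List.length_pySetD]

theorem stepA_take_sum (N : Nat) (da : List Int) (q : List Int)
    (hq : preQuery (N : Int) q = true) (hlen : da.length = N + 1) (m : Nat) :
    ((stepA da q).take m).sum = (da.take m).sum
      + (if qS q < (m : Int) ∧ (m : Int) ≤ qE q + 1 then qV q else 0) := by
  obtain ⟨s, e, v, rfl⟩ : ∃ s e v, q = [s, e, v] := by
    cases q with
    | nil => simp [preQuery] at hq
    | cons s q1 =>
      cases q1 with
      | nil => simp [preQuery] at hq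
      | cons e q2 =>
        cases q2 with
        | nil => simp [preQuery] at hq
        | cons v q3 =>
          cases q3 with
          | nil => exact ⟨s, e, v, rfl⟩
          | cons w q4 => simp [preQuery] at hq
  simp only [preQuery, Bool.and_eq_true, decide_eq_true_eq] at hq
  obtain ⟨⟨hs, hse⟩, hen⟩ := hq
  have h0e : (0 : Int) ≤ e + 1 := le_trans hs hse
  simp only [stepA, qS_triple, qE_triple, qV_triple,
    PySem.List.pySetD_of_nonneg, pyGetD_nonneg_getD, hs, h0e]
  rw [take_set_sum _ ((e + 1).toNat) _ m (by simp only [List.length_set]; omega),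
      take_set_sum _ (s.toNat) _ m (by omega)]
  split_ifs <;> first | ring1 | (exfalso; omega)

theorem foldA_take_sum (N : Nat) (l : List (List Int)) (da : List Int)
    (hl : ∀ q ∈ l, preQuery (N : Int) q = true) (hlen : da.length = N + 1) (m : Nat) :
    ((l.foldl stepA da).take m).sum = (da.take m).sum + covTake l m := by
  induction l generalizing da with
  | nil => simp [covTake]
  | cons q l ih =>
    rw [List.foldl_cons,
        ih (stepA da q) (fun q' hq' => hl q' (List.mem_cons_of_mem _ hq'))
          (by rw [length_stepA]; exact hlen),
        stepA_take_sum N da q (hl q (List.mem_cons_self ..)) hlen m]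
    simp only [covTake, List.map_cons, List.sum_cons]
    ring

theorem length_foldA (l : List (List Int)) (da : List Int) :
    (l.foldl stepA da).length = da.length := by
  induction l generalizing da with
  | nil => rfl
  | cons q l ih => rw [List.foldl_cons, ih, length_stepA]

theorem foldl_if_add (l : List (List Int)) (P : List Int → Prop) [DecidablePred P] (c : Int) :
    l.foldl (fun c q => if P q then c + qV q else c) c
      = c + (l.map (fun q => if P q then qV q else 0)).sum := by
  induction l generalizing c with
  | nil => simp
  | cons q l ih =>
    by_cases h : P q
    · simp only [List.foldl_cons, List.map_cons, List.sum_cons, if_pos h, ih]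
      ring
    · simp only [List.foldl_cons, List.map_cons, List.sum_cons, if_neg h, ih]
      ring

theorem cov_shift (l : List (List Int)) (i : Nat) :
    (l.map (fun q => if qS q ≤ (i : Int) ∧ (i : Int) ≤ qE q then qV q else 0)).sum
      = covTake l (i + 1) := by
  induction l with
  | nil => simp [covTake]
  | cons q l ih =>
    simp only [covTake, List.map_cons, List.sum_cons] at ih ⊢
    rw [ih]
    have hc : (qS q ≤ (i : Int) ∧ (i : Int) ≤ qE q)
        ↔ (qS q < ((i + 1 : Nat) : Int) ∧ ((i + 1 : Nat) : Int) ≤ qE q + 1) := by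
      constructor <;> intro h <;> exact ⟨by omega, by omega⟩
    rw [if_congr hc rfl rfl]

theorem covAt_covTake (queries : List (List Int)) (k : Int)
    (hk : k ≤ (queries.length : Int)) (i : Nat) :
    covAt queries k (i : Int) = covTake (queries.take k.toNat) (i + 1) := by
  unfold covAt
  rw [fold_take queries k hk (covStep (i : Int)) 0]
  rw [show (queries.take k.toNat).foldl (covStep (i : Int)) 0
      = (queries.take k.toNat).foldl
          (fun c q => if qS q ≤ (i : Int) ∧ (i : Int) ≤ qE q then c + qV q else c) 0 from rfl]
  rw [foldl_if_add _ (fun q => qS q ≤ (i : Int) ∧ (i : Int) ≤ qE q) 0, zero_add, cov_shift]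

theorem loop_char (nums da : List Int) (hlen : nums.length < da.length) :
    ∀ m : Nat, m ≤ nums.length →
    (PySem.List.pyRange 0 (m : Int) 1).foldl (stepL da nums) (some 0)
      = if ((List.range m).all fun i => !decide ((da.take (i + 1)).sum < nums.getD i 0)) = true
        then some ((da.take m).sum) else none := by
  intro m
  induction m with
  | zero =>
    intro _
    rw [Nat.cast_zero, PySem.List.pyRange_one_eq_nil (le_refl 0)]
    simp
  | succ m ih =>
    intro hm
    rw [Nat.cast_succ, PySem.List.pyRange_one_succ_right (by omega), List.foldl_append,
        ih (by omega), List.range_succ, List.all_append]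
    by_cases hp : ((List.range m).all fun i => !decide ((da.take (i + 1)).sum < nums.getD i 0)) = true
    · rw [if_pos hp, hp]
      simp only [List.foldl_cons, List.foldl_nil, stepL, PySem.List.pyGetD_natCast]
      rw [← take_succ_sum da m (by omega)]
      rw [show ([m].all fun i => !decide ((da.take (i + 1)).sum < nums.getD i 0))
          = !decide ((da.take (m + 1)).sum < nums.getD m 0) from by simp]
      by_cases hc : (da.take (m + 1)).sum < nums.getD m 0
      · rw [if_pos hc, decide_eq_true hc]
        simp
      · rw [if_neg hc, decide_eq_false hc]
        simp
    · rw [if_neg hp]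
      rw [Bool.not_eq_true] at hp
      rw [hp]
      simp [stepL]

theorem isSome_if (b : Bool) (x : Int) :
    (if b = true then some x else none : Option Int).isSome = b := by
  cases b <;> simp

theorem all_pyRange_eq (p : Int → Bool) (q : Nat → Bool) (h : ∀ i : Nat, p (i : Int) = q i) :
    ∀ N : Nat, (PySem.List.pyRange 0 (N : Int) 1).all p = (List.range N).all q := by
  intro N
  induction N with
  | zero =>
    rw [Nat.cast_zero, PySem.List.pyRange_one_eq_nil (le_refl 0)]
    simp
  | succ N ih =>
    rw [Nat.cast_succ, PySem.List.pyRange_one_succ_right (by omega), List.range_succ]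
    simp [List.all_append, ih, h]

theorem all_congr_mem {α : Type} (l : List α) (p q : α → Bool) (h : ∀ x ∈ l, p x = q x) :
    l.all p = l.all q := by
  induction l with
  | nil => rfl
  | cons a l ih =>
    simp only [List.all_cons, h a (by simp), ih fun x hx => h x (by simp [hx])]

-- ===== VERDICT (by name: the statement is the Claim_ definition above) =====
theorem can_form_zero_array_spec : Claim_equal_can_form_zero_array := by
  intro nums queries k _hDom hPre
  obtain ⟨hk, hall⟩ := hPre
  show can_form_zero_array nums queries k = can_form_zero_array_alt nums queries k
  have hqsall : ∀ q ∈ queries.take k.toNat, preQuery (nums.length : Int) q = true :=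
    fun q hq => List.all_eq_true.mp hall q hq
  have hdiff : diffOf queries k nums.length
      = (queries.take k.toNat).foldl stepA (List.replicate (nums.length + 1) 0) := by
    unfold diffOf
    exact fold_take queries k hk stepA _
  have hdlen : ((queries.take k.toNat).foldl stepA
      (List.replicate (nums.length + 1) (0 : Int))).length = nums.length + 1 := by
    rw [length_foldA, List.length_replicate]
  have hsum : ∀ i : Nat,
      (((queries.take k.toNat).foldl stepA
          (List.replicate (nums.length + 1) (0 : Int))).take (i + 1)).sum
        = covTake (queries.take k.toNat) (i + 1) := by
    intro i
    rw [foldA_take_sum nums.length _ _ hqsall (by simp) (i + 1),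
        sum_take_replicate_zero, zero_add]
  have hA : can_form_zero_array nums queries k
      = ((PySem.List.pyRange 0 (nums.length : Int) 1).foldl
          (stepL (diffOf queries k nums.length) nums) (some 0)).isSome := rfl
  have hB : can_form_zero_array_alt nums queries k
      = (PySem.List.pyRange 0 (nums.length : Int) 1).all
          (fun i => !(decide (covAt queries k i < PySem.List.pyGetD nums i 0))) := rfl
  rw [hA, hdiff,
      loop_char nums _ (by rw [hdlen]; omega) nums.length (le_refl _), isSome_if, hB,
      all_pyRange_eq _ (fun i => !(decide (covAt queries k (i : Int) < nums.getD i 0)))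
        (fun i => by rw [PySem.List.pyGetD_natCast]) nums.length]
  apply all_congr_mem
  intro i _hi
  rw [hsum i, covAt_covTake queries k hk i]
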